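-- pv_equiv track=rewrite | github.com/rohaanmalik/csc420-license-plate-detection | homographic_split.py | maxCont
-- ===== SOURCE A (Python) =====
-- def maxCont(array, n=None):
--     curStart = None
--     curPosition = 0
--     isCont = False
--     ret = []
--     for i in range(len(array)):
--         if curStart is None:
--             if (array[i]) > 0:
--                 curStart = i
--                 curPosition = i
--                 isCont = True
--         else:
--             if(array[i]) > 0:
--                 curPosition = i
--                 if not isCont:
--                     curStart = i
--                     curPosition = i
--                     isCont = True
--             else:
--                 if isCont:
--                     isCont = False
--                     ret.append((curStart, curPosition, curPosition-curStart))
--     if isCont: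
--         ret.append((curStart, curPosition, curPosition-curStart))
--
--     if n is not None:
--         sort_width = sorted(ret, key=lambda x: x[2], reverse=True)
--         if len(sort_width) >= n:
--             ret = sort_width[:n]
--             ret = sorted(ret, key=lambda x: x[0])
--     return ret
-- ===== SOURCE B (Python) =====
-- def maxCont(array, n=None):
--     ret = []
--     i, m = 0, len(array)
--     while i < m:
--         if array[i] > 0:
--             j = i
--             while j + 1 < m and array[j + 1] > 0:
--                 j += 1
--             ret.append((i, j, j - i))
--             i = j + 1
--         else:
--             i += 1
--     if n is not None:
--         sort_width = sorted(ret, key=lambda x: x[2], reverse=True)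
--         if len(sort_width) >= n:
--             ret = sort_width[:n]
--             ret = sorted(ret, key=lambda x: x[0])
--     return ret
-- ===== Notes on version B (the rewrite author's own statement) =====
-- stated objective: simpler
-- what changed: Replaced A's four-variable curStart/curPosition/isCont state machine (with its trailing flush) by a two-pointer scan that consumes each whole positive run at once and appends (start, end, end-start) directly; the optional top-n selection is kept verbatim.
import Mathlib
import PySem

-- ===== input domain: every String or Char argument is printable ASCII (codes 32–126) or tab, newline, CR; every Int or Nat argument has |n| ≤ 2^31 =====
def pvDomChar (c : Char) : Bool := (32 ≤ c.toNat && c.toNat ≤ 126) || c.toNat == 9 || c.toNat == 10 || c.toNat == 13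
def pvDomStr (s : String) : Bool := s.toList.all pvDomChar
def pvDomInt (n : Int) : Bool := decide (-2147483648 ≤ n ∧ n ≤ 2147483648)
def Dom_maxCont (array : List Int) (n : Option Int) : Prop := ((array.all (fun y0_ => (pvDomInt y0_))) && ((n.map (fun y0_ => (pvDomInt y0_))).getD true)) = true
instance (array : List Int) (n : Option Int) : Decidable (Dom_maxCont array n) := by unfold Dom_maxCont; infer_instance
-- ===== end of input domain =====

-- B replaces A's four-variable (curStart/curPosition/isCont) state machine by a two-pointer
-- scan that consumes each whole positive run at once (objective: simpler; same O(n) cost).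

-- ===== PORT A =====
-- A's loop body: state (curStart, curPosition, isCont, ret), one step per (i, array[i]).
def maxContStepA (st : Option Int × Int × Bool × List (Int × Int × Int)) (p : Int × Int) :
    Option Int × Int × Bool × List (Int × Int × Int) :=
  let (curStart, curPosition, isCont, ret) := st
  let (i, x) := p
  match curStart with
  | none => if x > 0 then (some i, i, true, ret) else (none, curPosition, isCont, ret)
  | some s =>
    if x > 0 then
      if !isCont then (some i, i, true, ret) else (some s, i, isCont, ret)
    else
      if isCont then (some s, curPosition, false, ret ++ [(s, curPosition, curPosition - s)])
      else (some s, curPosition, isCont, ret)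

-- the trailing 'if isCont: ret.append(...)' of A
def maxContFinA (st : Option Int × Int × Bool × List (Int × Int × Int)) : List (Int × Int × Int) :=
  match st with
  | (some s, curPosition, true, r) => r ++ [(s, curPosition, curPosition - s)]
  | (_, _, _, r) => r

def maxCont (array : List Int) (n : Option Int) : List (Int × Int × Int) :=
  let ret := maxContFinA ((PySem.List.enumerate array 0).foldl maxContStepA (none, 0, false, []))
  match n with
  | none => ret
  | some nv =>
    let sort_width := PySem.List.sorted ret (fun x => x.2.2) true
    if (sort_width.length : Int) ≥ nv then
      PySem.List.sorted (PySem.List.slice sort_width none (some nv)) (fun x => x.1) false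
    else ret

-- ===== PORT B =====
-- inner while: advance j while the next element is positive; returns (last index, rest of list)
def maxContConsume : List Int → Int → Int × List Int
  | [], j => (j, [])
  | x :: xs, j => if x > 0 then maxContConsume xs (j + 1) else (j, x :: xs)

theorem maxContConsume_len (xs : List Int) (j : Int) :
    (maxContConsume xs j).2.length ≤ xs.length := by
  induction xs generalizing j with
  | nil => simp [maxContConsume]
  | cons x xs ih =>
    simp only [maxContConsume]
    split
    · exact le_trans (ih (j + 1)) (by simp)
    · simp

-- outer while: i is the index of the head of the remaining list
def maxContRuns : List Int → Int → List (Int × Int × Int)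
  | [], _ => []
  | x :: xs, i =>
    if x > 0 then
      (i, (maxContConsume xs i).1, (maxContConsume xs i).1 - i)
        :: maxContRuns (maxContConsume xs i).2 ((maxContConsume xs i).1 + 1)
    else maxContRuns xs (i + 1)
  termination_by xs _ => xs.length
  decreasing_by
    · exact Nat.lt_succ_of_le (maxContConsume_len xs i)
    · simp

def maxCont_alt (array : List Int) (n : Option Int) : List (Int × Int × Int) :=
  let ret := maxContRuns array 0
  match n with
  | none => ret
  | some nv =>
    let sort_width := PySem.List.sorted ret (fun x => x.2.2) true
    if (sort_width.length : Int) ≥ nv then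
      PySem.List.sorted (PySem.List.slice sort_width none (some nv)) (fun x => x.1) false
    else ret

-- ===== PRECONDITION & SPEC =====
def Spec_maxCont (array : List Int) (n : Option Int) (out : List (Int × Int × Int)) : Prop := out = maxCont_alt array n
instance (array : List Int) (n : Option Int) (out : List (Int × Int × Int)) : Decidable (Spec_maxCont array n out) := by unfold Spec_maxCont; infer_instance

-- ===== CLAIM (what is proved, stated in full; the proofs are below) =====
def Claim_equal_maxCont : Prop := ∀ (array : List Int) (n : Option Int), Dom_maxCont array n → Spec_maxCont array n (maxCont array n)

-- ===== LEMMAS AND PROOFS =====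

-- combined invariant: out-of-run states (isCont = false) and in-run states agree with B's runs
theorem maxCont_fold_eq (xs : List Int) :
    (∀ (i : Int) (cs : Option Int) (cp : Int) (ret : List (Int × Int × Int)),
      maxContFinA ((PySem.List.enumerate xs i).foldl maxContStepA (cs, cp, false, ret))
        = ret ++ maxContRuns xs i) ∧
    (∀ (j s : Int) (ret : List (Int × Int × Int)),
      maxContFinA ((PySem.List.enumerate xs (j + 1)).foldl maxContStepA (some s, j, true, ret))
        = ret ++ (s, (maxContConsume xs j).1, (maxContConsume xs j).1 - s)
              :: maxContRuns (maxContConsume xs j).2 ((maxContConsume xs j).1 + 1)) := by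
  induction xs with
  | nil =>
    constructor
    · intro i cs cp ret
      cases cs <;> simp [PySem.List.enumerate_nil, maxContFinA, maxContRuns]
    · intro j s ret
      simp [PySem.List.enumerate_nil, maxContFinA, maxContConsume, maxContRuns]
  | cons x xs ih =>
    obtain ⟨ihOut, ihRun⟩ := ih
    constructor
    · intro i cs cp ret
      by_cases hx : x > 0
      · have h1 : maxContStepA (cs, cp, false, ret) (i, x) = (some i, i, true, ret) := by
          cases cs <;> simp [maxContStepA, hx]
        rw [PySem.List.enumerate_cons, List.foldl_cons, h1, ihRun i i ret]
        simp [maxContRuns, hx]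
      · have h1 : maxContStepA (cs, cp, false, ret) (i, x) = (cs, cp, false, ret) := by
          cases cs <;> simp [maxContStepA, hx]
        rw [PySem.List.enumerate_cons, List.foldl_cons, h1, ihOut (i + 1) cs cp ret]
        simp [maxContRuns, hx]
    · intro j s ret
      by_cases hx : x > 0
      · rw [PySem.List.enumerate_cons, List.foldl_cons]
        have h2 : maxContStepA (some s, j, true, ret) (j + 1, x) = (some s, j + 1, true, ret) := by
          simp [maxContStepA, hx]
        rw [h2, ihRun (j + 1) s ret]
        simp [maxContConsume, hx]
      · rw [PySem.List.enumerate_cons, List.foldl_cons]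
        have h2 : maxContStepA (some s, j, true, ret) (j + 1, x)
            = (some s, j, false, ret ++ [(s, j, j - s)]) := by
          simp [maxContStepA, hx]
        rw [h2, ihOut (j + 1 + 1) (some s) j (ret ++ [(s, j, j - s)])]
        simp [maxContConsume, maxContRuns, hx]

-- ===== VERDICT (by name: the statement is the Claim_ definition above) =====
theorem maxCont_spec : Claim_equal_maxCont := by
  intro array n _
  show maxCont array n = maxCont_alt array n
  have h := (maxCont_fold_eq array).1 0 none 0 []
  simp only [List.nil_append] at h
  unfold maxCont maxCont_alt
  rw [h]
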